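-- pv_equiv track=rewrite | github.com/daishironishida/AtCoder-submissions | abc/abc269/create_test.py | get_underbars
-- ===== SOURCE A (Python) =====
-- def get_underbars(underbars, additional):
--     # can optimize
--     if additional == 0:
--         return [underbars]
--     result = []
--     result += get_underbars(underbars, additional - 1)
--     for i in range(len(underbars)):
--         new_underbars = underbars[:i] + [underbars[i] + '_'] + underbars[i+1:]
--         result += get_underbars(new_underbars, additional - 1)
--     return result
-- ===== SOURCE B (Python) =====
-- def get_underbars(underbars, additional):
--     # Iterative enumeration: each outcome corresponds to a base-(n+1) code whose
--     # digits (most significant = outermost choice) say "0 = do nothing,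
--     # k>0 = append one '_' to position k-1"; build each list from its digit counts.
--     n = len(underbars)
--     base = n + 1
--     result = []
--     for code in range(base ** additional):
--         digits = []
--         x = code
--         for _ in range(additional):
--             x, d = divmod(x, base)
--             digits.append(d)
--         result.append([underbars[p] + '_' * digits.count(p + 1) for p in range(n)])
--     return result
-- ===== Notes on version B (the rewrite author's own statement) =====
-- stated objective: alternative
-- what changed: Replaces A's exponential tree recursion with a flat iterative enumeration: each output is indexed by a base-(len+1) code whose digits encode 'append one underscore at position d-1 (0 = nothing)', and each list is built once from the digit counts.
import Mathlib
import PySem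

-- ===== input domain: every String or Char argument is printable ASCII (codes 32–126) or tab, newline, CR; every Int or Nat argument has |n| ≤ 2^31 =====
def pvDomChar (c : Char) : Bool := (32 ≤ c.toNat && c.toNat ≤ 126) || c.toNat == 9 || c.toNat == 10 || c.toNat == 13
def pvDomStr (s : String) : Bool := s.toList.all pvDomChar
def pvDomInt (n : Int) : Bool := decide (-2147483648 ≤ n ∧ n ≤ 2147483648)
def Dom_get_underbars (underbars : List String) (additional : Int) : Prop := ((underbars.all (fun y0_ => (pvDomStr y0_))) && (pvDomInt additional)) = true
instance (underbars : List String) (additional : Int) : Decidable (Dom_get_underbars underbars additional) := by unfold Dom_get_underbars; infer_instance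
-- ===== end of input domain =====

-- B replaces A's tree recursion by a flat iterative enumeration of base-(n+1) codes
-- (digit d>0 = one '_' appended at position d-1); same values, no recursion ('alternative').


-- ===== PORT A =====
-- A's recursion runs on the non-negative recursion depth; the Nat fuel is exactly
-- `additional` on the precondition 0 ≤ additional (A raises RecursionError below 0).
def getUnderbarsRec (underbars : List String) : Nat → List (List String)
  | 0 => [underbars]
  | a + 1 =>
      let result : List (List String) := []
      let result := result ++ getUnderbarsRec underbars a
      (List.range underbars.length).foldl
        (fun (result : List (List String)) (i : Nat) =>
          let new_underbars :=
            PySem.List.slice underbars none (some (i : Int)) ++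
            [PySem.List.pyGetD underbars (i : Int) "" ++ "_"] ++
            PySem.List.slice underbars (some ((i : Int) + 1)) none
          result ++ getUnderbarsRec new_underbars a)
        result

def get_underbars (underbars : List String) (additional : Int) : List (List String) :=
  getUnderbarsRec underbars additional.toNat

-- ===== PORT B =====
-- the inner `for _ in range(additional): x, d = divmod(x, base); digits.append(d)` loop
def altDigits (base : Nat) : Nat → Nat → List Nat
  | _, 0 => []
  | x, a + 1 => x % base :: altDigits base (x / base) a

def get_underbars_alt (underbars : List String) (additional : Int) : List (List String) :=
  let n := underbars.length
  let base := n + 1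
  (List.range (base ^ additional.toNat)).foldl
    (fun result code =>
      let digits := altDigits base code additional.toNat
      result ++ [(List.range n).map (fun p =>
        underbars.getD p "" ++ String.ofList (List.replicate (digits.count (p + 1)) '_'))])
    []

-- ===== PRECONDITION & SPEC =====
-- Pre_ excludes additional < 0, where Python A recurses without bound (RecursionError)
-- and Python B's range(base ** additional) raises TypeError.
def Pre_get_underbars (underbars : List String) (additional : Int) : Prop := 0 ≤ additional
instance (underbars : List String) (additional : Int) : Decidable (Pre_get_underbars underbars additional) := by unfold Pre_get_underbars; infer_instance
def pvWitness_get_underbars : List String × Int := (["a", "b"], 2)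

def Spec_get_underbars (underbars : List String) (additional : Int) (out : List (List String)) : Prop := out = get_underbars_alt underbars additional
instance (underbars : List String) (additional : Int) (out : List (List String)) : Decidable (Spec_get_underbars underbars additional out) := by unfold Spec_get_underbars; infer_instance

-- ===== CLAIM (what is proved, stated in full; the proofs are below) =====
def Claim_equal_get_underbars : Prop := ∀ (underbars : List String) (additional : Int), Dom_get_underbars underbars additional → Pre_get_underbars underbars additional → Spec_get_underbars underbars additional (get_underbars underbars additional)

-- ===== LEMMAS AND PROOFS =====

-- the list A builds at position i (after rewriting the PySem slices/index)
def modAt (u : List String) (i : Nat) : List String :=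
  u.take i ++ [u.getD i "" ++ "_"] ++ u.drop (i + 1)

-- the list B builds for a given code (n positions, a digits, base n+1)
def buildF (n : Nat) (u : List String) (a : Nat) (code : Nat) : List String :=
  (List.range n).map (fun p =>
    u.getD p "" ++ String.ofList (List.replicate ((altDigits (n + 1) code a).count (p + 1)) '_'))

theorem map_getD_range (u : List String) :
    (List.range u.length).map (fun p => u.getD p "") = u := by
  apply List.ext_getElem (by simp)
  intro i h1 h2
  simp [List.getD_eq_getElem?_getD, List.getElem?_eq_getElem h2]

theorem range_mul (b m : Nat) :
    List.range (b * m) = (List.range b).flatMap (fun d => (List.range m).map (fun r => d * m + r)) := by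
  induction b with
  | zero => simp
  | succ b ih =>
      rw [Nat.succ_mul, List.range_add, ih, List.range_succ, List.flatMap_append]
      simp [Nat.add_comm]

theorem altDigits_split (b : Nat) (hb : 0 < b) :
    ∀ (a d r : Nat), r < b ^ a → d < b →
      altDigits b (d * b ^ a + r) (a + 1) = altDigits b r a ++ [d] := by
  intro a
  induction a with
  | zero =>
      intro d r hr hd
      have hr0 : r = 0 := by simpa using hr
      subst hr0
      simp [altDigits, Nat.mod_eq_of_lt hd]
  | succ a ih =>
      intro d r hr hd
      have h1 : d * b ^ (a + 1) + r = r + d * b ^ a * b := by ring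
      have hmod : (d * b ^ (a + 1) + r) % b = r % b := by
        rw [h1, Nat.add_mul_mod_self_right]
      have hdiv : (d * b ^ (a + 1) + r) / b = d * b ^ a + r / b := by
        rw [h1, Nat.add_mul_div_right _ _ hb, Nat.add_comm]
      have hrb : r / b < b ^ a := by
        rw [Nat.div_lt_iff_lt_mul hb]
        calc r < b ^ (a + 1) := hr
          _ = b ^ a * b := by ring
      show (d * b ^ (a + 1) + r) % b :: altDigits b ((d * b ^ (a + 1) + r) / b) (a + 1)
        = (r % b :: altDigits b (r / b) a) ++ [d]
      rw [hmod, hdiv, ih d (r / b) hrb hd]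
      rfl

theorem underscore_succ (s : String) (k : Nat) :
    s ++ "_" ++ String.ofList (List.replicate k '_') = s ++ String.ofList (List.replicate (k + 1) '_') := by
  apply String.toList_injective
  simp [List.replicate_succ]

theorem buildF_zero_digit (n : Nat) (u : List String) (a r : Nat) (hr : r < (n + 1) ^ a) :
    buildF n u (a + 1) r = buildF n u a r := by
  unfold buildF
  have hd : altDigits (n + 1) r (a + 1) = altDigits (n + 1) r a ++ [0] := by
    simpa using altDigits_split (n + 1) (Nat.succ_pos n) a 0 r hr (Nat.succ_pos n)
  rw [hd]
  apply List.map_congr_left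
  intro p _
  rw [List.count_append, show List.count (p + 1) [0] = 0 by simp, Nat.add_zero]

theorem length_modAt (u : List String) (i : Nat) (h : i < u.length) :
    (modAt u i).length = u.length := by
  unfold modAt
  simp
  omega

theorem modAt_eq_set (u : List String) (i : Nat) (h : i < u.length) :
    modAt u i = u.set i (u.getD i "" ++ "_") := by
  unfold modAt
  rw [List.set_eq_take_append_cons_drop, if_pos h]
  simp

theorem buildF_succ_digit (n : Nat) (u : List String) (hu : u.length = n)
    (a i r : Nat) (hi : i < n) (hr : r < (n + 1) ^ a) :
    buildF n u (a + 1) ((i + 1) * (n + 1) ^ a + r) = buildF n (modAt u i) a r := by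
  unfold buildF
  rw [altDigits_split (n + 1) (Nat.succ_pos n) a (i + 1) r hr (by omega)]
  apply List.map_congr_left
  intro p hp
  rw [List.mem_range] at hp
  have hpu : p < u.length := hu ▸ hp
  have hiu : i < u.length := hu ▸ hi
  rw [modAt_eq_set u i hiu, List.count_append]
  have hset : (u.set i (u.getD i "" ++ "_")).getD p "" =
      if p = i then u.getD i "" ++ "_" else u.getD p "" := by
    rw [List.getD_eq_getElem _ _ (by simpa using hpu)]
    by_cases hpi : p = i
    · subst hpi
      rw [List.getElem_set_self, if_pos rfl]
    · rw [List.getElem_set_ne (by omega), if_neg hpi]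
      exact (List.getD_eq_getElem _ _ hpu).symm
  rw [hset]
  by_cases hpi : p = i
  · subst hpi
    have hc : List.count (p + 1) [p + 1] = 1 := by simp
    rw [hc, if_pos rfl, ← underscore_succ]
  · have hc : List.count (p + 1) [i + 1] = 0 := by
      simp [List.count_singleton]
      omega
    rw [hc, if_neg hpi, Nat.add_zero]

theorem getUnderbarsRec_eq (n : Nat) :
    ∀ (a : Nat) (u : List String), u.length = n →
      getUnderbarsRec u a = (List.range ((n + 1) ^ a)).map (buildF n u a) := by
  intro a
  induction a with
  | zero =>
      intro u hu
      show [u] = (List.range 1).map (buildF n u 0)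
      have hb : buildF n u 0 0 = u := by
        unfold buildF
        rw [← hu, show altDigits (u.length + 1) 0 0 = [] from rfl]
        simpa using map_getD_range u
      simp [hb]
  | succ a ih =>
      intro u hu
      show (List.range u.length).foldl
          (fun (result : List (List String)) (i : Nat) => result ++ getUnderbarsRec
            (PySem.List.slice u none (some (i : Int)) ++
              [PySem.List.pyGetD u (i : Int) "" ++ "_"] ++
              PySem.List.slice u (some ((i : Int) + 1)) none) a)
          ([] ++ getUnderbarsRec u a) = _
      have hslice : ∀ i : Nat,
          PySem.List.slice u none (some (i : Int)) ++
            [PySem.List.pyGetD u (i : Int) "" ++ "_"] ++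
            PySem.List.slice u (some ((i : Int) + 1)) none = modAt u i := by
        intro i
        rw [PySem.List.slice_to_natCast, PySem.List.pyGetD_natCast,
          show ((i : Int) + 1) = ((i + 1 : Nat) : Int) by push_cast; ring,
          PySem.List.slice_from_natCast]
        rfl
      simp only [hslice]
      rw [PySem.List.foldl_append_eq_flatMap, List.nil_append]
      rw [ih u hu]
      have hflat : (List.range u.length).flatMap (fun i => getUnderbarsRec (modAt u i) a)
          = (List.range n).flatMap (fun i => (List.range ((n + 1) ^ a)).map (buildF n (modAt u i) a)) := by
        rw [hu]
        apply List.flatMap_congr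
        intro i hi
        rw [List.mem_range] at hi
        exact ih (modAt u i) (by rw [length_modAt u i (hu ▸ hi), hu])
      rw [hflat]
      -- right-hand side
      rw [show (n + 1) ^ (a + 1) = (n + 1) * (n + 1) ^ a by ring, range_mul,
        List.map_flatMap, List.range_succ_eq_map, List.flatMap_cons, List.flatMap_map]
      congr 1
      · rw [List.map_map]
        apply List.map_congr_left
        intro r hr
        rw [List.mem_range] at hr
        show buildF n u a r = buildF n u (a + 1) (0 * (n + 1) ^ a + r)
        rw [Nat.zero_mul, Nat.zero_add]
        exact (buildF_zero_digit n u a r hr).symm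
      · apply List.flatMap_congr
        intro i hi
        rw [List.mem_range] at hi
        rw [List.map_map]
        apply List.map_congr_left
        intro r hr
        rw [List.mem_range] at hr
        show buildF n (modAt u i) a r = buildF n u (a + 1) ((i + 1) * (n + 1) ^ a + r)
        exact (buildF_succ_digit n u hu a i r hi hr).symm

theorem alt_eq_map (u : List String) (t : Nat) :
    get_underbars_alt u (t : Int) = (List.range ((u.length + 1) ^ t)).map (buildF u.length u t) := by
  unfold get_underbars_alt
  show (List.range ((u.length + 1) ^ ((t : Int)).toNat)).foldl
      (fun result code => result ++
        [(List.range u.length).map (fun p =>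
          u.getD p "" ++ String.ofList
            (List.replicate ((altDigits (u.length + 1) code ((t : Int)).toNat).count (p + 1)) '_'))])
      [] = _
  simp only [Int.toNat_natCast]
  rw [PySem.List.foldl_append_singleton_eq_map, List.nil_append]
  rfl

-- ===== VERDICT (by name: the statement is the Claim_ definition above) =====
theorem get_underbars_spec : Claim_equal_get_underbars := by
  intro u additional _ hpre
  unfold Spec_get_underbars get_underbars
  have hc : ((additional.toNat : Int)) = additional := Int.toNat_of_nonneg hpre
  rw [getUnderbarsRec_eq u.length additional.toNat u rfl, ← hc, alt_eq_map u additional.toNat]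
  simp only [Int.toNat_natCast]
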